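-- pv_equiv track=rewrite | github.com/betich/chess-detection | src/chess_board/detect.py | convert_to_san
-- ===== SOURCE A (Python) =====
-- def convert_to_san(moves):
--     san_moves = []
--     move_number = 1
--
--     for i in range(0, len(moves), 2):
--         if i + 1 < len(moves):
--             # Pair moves for each turn
--             san_moves.append(f"{move_number}. {moves[i]} {moves[i+1]}")
--         else:
--             # If there's an odd move at the end, only record that
--             san_moves.append(f"{move_number}. {moves[i]}")
--         move_number += 1
--
--     return " ".join(san_moves)
-- ===== SOURCE B (Python) =====
-- def convert_to_san(moves):
--     tokens = []
--     for i, move in enumerate(moves):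
--         if i % 2 == 0:
--             tokens.append(f"{i // 2 + 1}.")
--         tokens.append(move)
--     return " ".join(tokens)
-- ===== Notes on version B (the rewrite author's own statement) =====
-- stated objective: simpler
-- what changed: Iterates one move per step with enumerate, interleaving flat number-marker tokens and move tokens into a single list joined once, instead of a stride-2 index loop that pairs moves into per-turn strings.
import Mathlib
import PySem

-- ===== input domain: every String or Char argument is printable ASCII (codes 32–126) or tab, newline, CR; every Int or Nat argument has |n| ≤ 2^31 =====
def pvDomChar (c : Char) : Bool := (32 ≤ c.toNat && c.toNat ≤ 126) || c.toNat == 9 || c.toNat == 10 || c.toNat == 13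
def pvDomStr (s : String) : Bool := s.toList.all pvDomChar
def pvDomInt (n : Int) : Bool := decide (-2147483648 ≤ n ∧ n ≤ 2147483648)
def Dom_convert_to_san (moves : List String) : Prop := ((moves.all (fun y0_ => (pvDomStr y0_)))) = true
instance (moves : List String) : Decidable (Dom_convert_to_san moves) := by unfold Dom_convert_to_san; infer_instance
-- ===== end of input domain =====

-- B iterates one move per step, interleaving flat number-marker tokens with move tokens into one list joined once (simpler decomposition, same cost); A pairs moves in a stride-2 index loop.

-- ===== PORT A =====
-- loop body of A's stride-2 for loop; state = (san_moves, move_number).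
-- the indices i, i+1 read by the loop are always in range, so pyGetD's default is never used.
def stepA (moves : List String) (st : List String × Int) (i : Int) : List String × Int :=
  if i + 1 < PySem.List.len moves then
    (st.1 ++ [PySem.Int.toStr st.2 ++ ". " ++ PySem.List.pyGetD moves i "" ++ " " ++ PySem.List.pyGetD moves (i + 1) ""], st.2 + 1)
  else
    (st.1 ++ [PySem.Int.toStr st.2 ++ ". " ++ PySem.List.pyGetD moves i ""], st.2 + 1)

def convert_to_san (moves : List String) : String :=
  let st := (PySem.List.pyRange 0 (PySem.List.len moves) 2).foldl (stepA moves) ([], 1)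
  PySem.Str.join " " st.1

-- ===== PORT B =====
-- loop body of B's enumerate loop; state = tokens.
def stepB (tokens : List String) (p : Int × String) : List String :=
  (if PySem.Int.mod p.1 2 = 0 then tokens ++ [PySem.Int.toStr (PySem.Int.floordiv p.1 2 + 1) ++ "."] else tokens) ++ [p.2]

def convert_to_san_alt (moves : List String) : String :=
  let tokens := (PySem.List.enumerate moves 0).foldl stepB []
  PySem.Str.join " " tokens

-- ===== PRECONDITION & SPEC =====
def Spec_convert_to_san (moves : List String) (out : String) : Prop := out = convert_to_san_alt moves
instance (moves : List String) (out : String) : Decidable (Spec_convert_to_san moves out) := by unfold Spec_convert_to_san; infer_instance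

-- ===== CLAIM (what is proved, stated in full; the proofs are below) =====
def Claim_equal_convert_to_san : Prop := ∀ (moves : List String), Dom_convert_to_san moves → Spec_convert_to_san moves (convert_to_san moves)

-- ===== LEMMAS AND PROOFS =====

-- per-turn strings of A, starting at turn index k (turn number k+1)
def chunks (k : Nat) : List String → List String
  | [] => []
  | [a] => [PySem.Int.toStr (k + 1 : Nat) ++ ". " ++ a]
  | a :: b :: rest => (PySem.Int.toStr (k + 1 : Nat) ++ ". " ++ a ++ " " ++ b) :: chunks (k + 1) rest

-- flat tokens of B, starting at turn index k
def toks (k : Nat) : List String → List String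
  | [] => []
  | [a] => [PySem.Int.toStr (k + 1 : Nat) ++ ".", a]
  | a :: b :: rest => (PySem.Int.toStr (k + 1 : Nat) ++ ".") :: a :: b :: toks (k + 1) rest

theorem mod2k (k : Nat) : PySem.Int.mod ((2 * k : Nat) : Int) 2 = 0 := by
  rw [PySem.Int.mod_eq_emod_of_pos (by norm_num)]; push_cast; omega

theorem mod2k1 (k : Nat) : PySem.Int.mod (((2 * k : Nat) : Int) + 1) 2 = 1 := by
  rw [PySem.Int.mod_eq_emod_of_pos (by norm_num)]; push_cast; omega

theorem div2k (k : Nat) : PySem.Int.floordiv ((2 * k : Nat) : Int) 2 = k := by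
  rw [PySem.Int.floordiv_eq_ediv_of_pos (by norm_num)]; push_cast
  exact Int.mul_ediv_cancel_left _ (by norm_num)

theorem pyRange_two_nil (a b : Int) (h : b ≤ a) : PySem.List.pyRange a b 2 = [] := by
  rw [PySem.List.pyRange_of_pos a b (by norm_num)]
  simp [if_neg (not_lt.mpr h)]

theorem pyRange_two_cons (a b : Int) (h : a < b) :
    PySem.List.pyRange a b 2 = a :: PySem.List.pyRange (a + 2) b 2 := by
  rw [PySem.List.pyRange_of_pos a b (by norm_num), PySem.List.pyRange_of_pos (a + 2) b (by norm_num)]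
  have h1 : ((b - a + 2 - 1) / 2).toNat
      = (if a + 2 < b then ((b - (a + 2) + 2 - 1) / 2).toNat else 0) + 1 := by
    split_ifs with h2 <;> omega
  rw [if_pos h, h1, List.range_succ_eq_map]
  simp [List.map_map, Function.comp_def]
  intro x _
  ring

theorem loopA (moves : List String) (k : Nat) (acc : List String) :
    (PySem.List.pyRange ((2 * k : Nat) : Int) (PySem.List.len moves) 2).foldl (stepA moves) (acc, ((k + 1 : Nat) : Int)) =
      (acc ++ chunks k (moves.drop (2 * k)), ((k + 1 + (chunks k (moves.drop (2 * k))).length : Nat) : Int)) := by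
  have key : ∀ (n k : Nat) (acc : List String), moves.length - 2 * k = n →
      (PySem.List.pyRange ((2 * k : Nat) : Int) (PySem.List.len moves) 2).foldl (stepA moves) (acc, ((k + 1 : Nat) : Int)) =
      (acc ++ chunks k (moves.drop (2 * k)), ((k + 1 + (chunks k (moves.drop (2 * k))).length : Nat) : Int)) := by
    intro n
    induction n using Nat.strong_induction_on with
    | _ n ih =>
      intro k acc hn
      by_cases h : 2 * k < moves.length
      · rw [pyRange_two_cons _ _ (by simp [PySem.List.len]; exact_mod_cast h)]
        by_cases h2 : 2 * k + 1 < moves.length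
        · have hd : moves.drop (2 * k) = moves[2 * k] :: moves[2 * k + 1] :: moves.drop (2 * k + 2) := by
            rw [List.drop_eq_getElem_cons (by omega), List.drop_eq_getElem_cons (h := by omega)]
          have harg : ((2 * k : Nat) : Int) + 2 = ((2 * (k + 1) : Nat) : Int) := by push_cast; ring
          have hnum : ((k + 1 : Nat) : Int) + 1 = ((k + 1 + 1 : Nat) : Int) := by push_cast; ring
          simp only [List.foldl_cons, stepA,
            if_pos (show ((2 * k : Nat) : Int) + 1 < PySem.List.len moves by simp [PySem.List.len]; exact_mod_cast h2)]
          rw [show ((2 * k : Nat) : Int) + 1 = ((2 * k + 1 : Nat) : Int) by push_cast; ring]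
          simp only [PySem.List.pyGetD_natCast]
          rw [harg, hnum]
          rw [ih (moves.length - 2 * (k + 1)) (by omega) (k + 1) _ rfl]
          rw [hd]
          have h22 : 2 * (k + 1) = 2 * k + 2 := by ring
          simp only [chunks, List.getD_eq_getElem?_getD, List.getElem?_eq_getElem (by omega : 2 * k < moves.length),
            List.getElem?_eq_getElem (by omega : 2 * k + 1 < moves.length), h22, Prod.mk.injEq]
          refine ⟨by simp, ?_⟩
          congr 1
          simp [List.length_cons]
          omega
        · have hlen : moves.length = 2 * k + 1 := by omega
          have hd : moves.drop (2 * k) = [moves[2 * k]] := by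
            rw [List.drop_eq_getElem_cons (by omega)]
            simp [List.drop_eq_nil_of_le, hlen]
          simp only [List.foldl_cons, stepA,
            if_neg (show ¬(((2 * k : Nat) : Int) + 1 < PySem.List.len moves) by simp [PySem.List.len]; omega)]
          rw [pyRange_two_nil _ _ (by simp [PySem.List.len]; omega)]
          simp only [PySem.List.pyGetD_natCast, List.foldl_nil, hd, chunks, Prod.mk.injEq]
          refine ⟨by simp [List.getD_eq_getElem?_getD, List.getElem?_eq_getElem (by omega : 2 * k < moves.length)], ?_⟩
          norm_num
      · rw [pyRange_two_nil _ _ (by simp [PySem.List.len]; omega)]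
        rw [List.drop_eq_nil_of_le (by omega)]
        simp [chunks]
  exact key (moves.length - 2 * k) k acc rfl

theorem loopB : ∀ (t : List String) (k : Nat) (acc : List String),
    (PySem.List.enumerate t ((2 * k : Nat) : Int)).foldl stepB acc = acc ++ toks k t
  | [], _, acc => by simp [toks, PySem.List.enumerate_nil]
  | [a], k, acc => by
      simp [PySem.List.enumerate_cons, PySem.List.enumerate_nil, toks, stepB]
  | a :: b :: r, k, acc => by
      have ih := loopB r (k + 1) ((acc ++ [PySem.Int.toStr (k + 1 : Nat) ++ "."] ++ [a]) ++ [b])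
      simp only [PySem.List.enumerate_cons, List.foldl_cons]
      rw [show ((2 * k : Nat) : Int) + 1 + 1 = ((2 * (k + 1) : Nat) : Int) by push_cast; ring] at *
      simp only [stepB, mod2k k, mod2k1 k, div2k k] at *
      simp at ih ⊢
      rw [ih]
      simp [toks]

theorem str_join_singleton (sep p : String) : PySem.Str.join sep [p] = p :=
  String.toList_inj.mp (by simp [PySem.Str.toList_join, PySem.Chars.join_singleton])

theorem str_join_cons_cons (sep p q : String) (rest : List String) :
    PySem.Str.join sep (p :: q :: rest) = p ++ sep ++ PySem.Str.join sep (q :: rest) :=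
  String.toList_inj.mp (by
    simp [PySem.Str.toList_join, PySem.Chars.join_cons_cons, String.toList_append])

theorem chunks_cons_ne_nil (k : Nat) (c : String) (r : List String) : chunks k (c :: r) ≠ [] := by
  match r with
  | [] => simp [chunks]
  | d :: r' => simp [chunks]

theorem toks_cons_ne_nil (k : Nat) (c : String) (r : List String) : toks k (c :: r) ≠ [] := by
  match r with
  | [] => simp [toks]
  | d :: r' => simp [toks]

theorem dot_space : (". " : String).toList = ("." : String).toList ++ (" " : String).toList := rfl

theorem join_chunks_toks : ∀ (k : Nat) (t : List String),
    PySem.Str.join " " (chunks k t) = PySem.Str.join " " (toks k t)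
  | _, [] => rfl
  | k, [a] => by
      refine String.toList_inj.mp ?_
      simp [chunks, toks, str_join_singleton, str_join_cons_cons, String.toList_append, dot_space]
  | k, [a, b] => by
      refine String.toList_inj.mp ?_
      simp [chunks, toks, str_join_singleton, str_join_cons_cons, String.toList_append, dot_space]
  | k, a :: b :: c :: r => by
      obtain ⟨x, xs, hx⟩ := List.exists_cons_of_ne_nil (chunks_cons_ne_nil (k + 1) c r)
      obtain ⟨y, ys, hy⟩ := List.exists_cons_of_ne_nil (toks_cons_ne_nil (k + 1) c r)
      have ih := join_chunks_toks (k + 1) (c :: r)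
      refine String.toList_inj.mp ?_
      rw [show chunks k (a :: b :: c :: r)
            = (PySem.Int.toStr (k + 1 : Nat) ++ ". " ++ a ++ " " ++ b) :: chunks (k + 1) (c :: r) from rfl,
          show toks k (a :: b :: c :: r)
            = (PySem.Int.toStr (k + 1 : Nat) ++ ".") :: a :: b :: toks (k + 1) (c :: r) from rfl,
          hx, hy, str_join_cons_cons, str_join_cons_cons, str_join_cons_cons, ← hx, ← hy, ih, hy]
      rw [str_join_cons_cons " " b y ys]
      simp [String.toList_append, dot_space]

-- ===== VERDICT (by name: the statement is the Claim_ definition above) =====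
theorem convert_to_san_spec : Claim_equal_convert_to_san := by
  intro moves _
  unfold Spec_convert_to_san convert_to_san convert_to_san_alt
  have hA := loopA moves 0 []
  have hB := loopB moves 0 []
  norm_num at hA hB
  simp only [PySem.List.len, hA, hB]
  exact join_chunks_toks 0 moves
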